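-- pv_equiv track=rewrite | github.com/JasonLai42/CS-CM122 | p2/HP2/test_hasher.py | find_match
-- ===== SOURCE A (Python) =====
-- def find_match(seq_read, ref_dict, mismatches):
--     match_found = -1
--     for k, v in ref_dict.items():
--         for index in range(0, len(k)-1):
--             if seq_read[:index] == k[:index] and seq_read[index + 1:] == k[index + 1:]:
--                 if mismatches.get((k[index], seq_read[index], v + index), "DNE") == "DNE":
--                     mismatches[(k[index], seq_read[index], v + index)] = 1
--                 else:
--                     mismatches[(k[index], seq_read[index], v + index)] += 1
--                 match_found = v
--                 break
--     return match_found
-- ===== SOURCE B (Python) =====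
-- # B: instead of testing every split index with O(L) slice comparisons (O(L^2) per key),
-- # compute the common prefix/suffix lengths once per key and derive the first matching
-- # index directly (O(L) per key).  Mutates `mismatches` exactly as A does.
-- def _cpl(a, b):
--     """Length of the common prefix of two sequences."""
--     i = 0
--     m = min(len(a), len(b))
--     while i < m and a[i] == b[i]:
--         i += 1
--     return i
--
-- def find_match(seq_read, ref_dict, mismatches):
--     n = len(seq_read)
--     rev_read = seq_read[::-1]
--     match_found = -1
--     for k, v in ref_dict.items():
--         if len(k) != n:
--             continue
--         q = _cpl(rev_read, k[::-1])
--         i = n - 1 - q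
--         if i < 0:
--             i = 0
--         if i > n - 2:
--             continue
--         if i > _cpl(seq_read, k):
--             continue
--         key = (k[i], seq_read[i], v + i)
--         mismatches[key] = mismatches.get(key, 0) + 1
--         match_found = v
--     return match_found
-- ===== Notes on version B (the rewrite author's own statement) =====
-- stated objective: faster
-- what changed: A tests every split index of every reference key with two O(L) slice comparisons (O(L^2) per key); B computes the common prefix and common suffix length of the read and each key once and derives the unique first matching index arithmetically (O(L) per key).
import Mathlib
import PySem

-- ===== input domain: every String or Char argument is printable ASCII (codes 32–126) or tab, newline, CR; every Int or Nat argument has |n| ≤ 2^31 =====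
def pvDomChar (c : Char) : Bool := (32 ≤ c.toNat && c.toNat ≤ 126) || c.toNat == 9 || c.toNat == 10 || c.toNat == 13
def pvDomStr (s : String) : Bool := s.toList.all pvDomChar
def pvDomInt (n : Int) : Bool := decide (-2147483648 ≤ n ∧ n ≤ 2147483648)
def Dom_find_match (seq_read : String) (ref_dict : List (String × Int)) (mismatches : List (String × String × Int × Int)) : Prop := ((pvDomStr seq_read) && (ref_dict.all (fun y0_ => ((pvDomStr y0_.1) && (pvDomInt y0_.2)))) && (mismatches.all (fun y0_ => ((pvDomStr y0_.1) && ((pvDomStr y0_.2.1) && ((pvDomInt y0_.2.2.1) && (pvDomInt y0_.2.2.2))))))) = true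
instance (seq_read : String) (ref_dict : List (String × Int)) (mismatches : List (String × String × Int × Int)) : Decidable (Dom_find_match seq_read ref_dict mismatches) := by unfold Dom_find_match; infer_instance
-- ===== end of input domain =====

-- B replaces A's per-index slice comparisons by one common-prefix/common-suffix computation per key.
-- Python A mutates `mismatches` in place; B performs the identical mutation; the equivalence proved
-- here is about the RETURN value (the ports carry the dict through the fold but return only the int).

-- ===== PORT A =====
-- mismatches dict, shared input decoding for both ports (key = first three components)
def pvMisDict (mismatches : List (String × String × Int × Int)) : PySem.Dict (String × String × Int) Int :=
  PySem.Dict.ofList (mismatches.map (fun p => ((p.1, p.2.1, p.2.2.1), p.2.2.2)))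

-- the mismatch-table key (k[index], seq_read[index], v + index), used verbatim by both Pythons
def pvMisKey (s k : List Char) (v i : Int) : String × String × Int :=
  (String.ofList [PySem.List.pyGetD k i ' '], String.ofList [PySem.List.pyGetD s i ' '], v + i)

-- seq_read[:index] == k[:index] and seq_read[index+1:] == k[index+1:]
def pvCondA (s k : List Char) (i : Int) : Bool :=
  (PySem.List.slice s none (some i) == PySem.List.slice k none (some i)) &&
  (PySem.List.slice s (some (i + 1)) none == PySem.List.slice k (some (i + 1)) none)

-- the inner `for index in range(0, len(k)-1): … break` loop: first index satisfying the condition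
def pvScanA (s k : List Char) : List Int → Option Int
  | [] => none
  | i :: rest => if pvCondA s k i then some i else pvScanA s k rest

def pvStepA (s : List Char) (st : Int × PySem.Dict (String × String × Int) Int)
    (kv : String × Int) : Int × PySem.Dict (String × String × Int) Int :=
  let k := kv.1.toList
  match pvScanA s k (PySem.List.pyRange 0 ((k.length : Int) - 1) 1) with
  | none => st
  | some i =>
      let key := pvMisKey s k kv.2 i
      match st.2.get? key with                 -- mismatches.get(key, "DNE") == "DNE" ↔ get? = none
      | none => (kv.2, st.2.insert key 1)
      | some c => (kv.2, st.2.insert key (c + 1))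

def find_match (seq_read : String) (ref_dict : List (String × Int)) (mismatches : List (String × String × Int × Int)) : Int :=
  (ref_dict.foldl (pvStepA seq_read.toList) (-1, pvMisDict mismatches)).1

-- ===== PORT B =====
-- _cpl: common prefix length of two sequences (the while loop, as structural recursion)
def pvCpl : List Char → List Char → Nat
  | a :: as, b :: bs => if a = b then pvCpl as bs + 1 else 0
  | _, _ => 0

def pvStepB (s rs : List Char) (n : Nat) (st : Int × PySem.Dict (String × String × Int) Int)
    (kv : String × Int) : Int × PySem.Dict (String × String × Int) Int :=
  let k := kv.1.toList
  if k.length ≠ n then st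
  else
    let q := pvCpl rs k.reverse
    let i0 : Int := (n : Int) - 1 - (q : Int)
    let i : Int := if i0 < 0 then 0 else i0
    if (n : Int) - 2 < i then st
    else if (pvCpl s k : Int) < i then st
    else
      let key := pvMisKey s k kv.2 i
      (kv.2, st.2.insert key (st.2.getD key 0 + 1))

def find_match_alt (seq_read : String) (ref_dict : List (String × Int)) (mismatches : List (String × String × Int × Int)) : Int :=
  (ref_dict.foldl (pvStepB seq_read.toList seq_read.toList.reverse seq_read.toList.length)
      (-1, pvMisDict mismatches)).1

-- ===== PRECONDITION & SPEC =====
-- Pre_ excludes association lists in which ref_dict (a Python dict) has duplicate keys: such a list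
-- does not represent any Python dict input (dict construction collapses the duplicates), so the
-- Python and an assoc-list port can disagree there.  No input A accepts is excluded.
def Pre_find_match (seq_read : String) (ref_dict : List (String × Int)) (mismatches : List (String × String × Int × Int)) : Prop :=
  (ref_dict.map Prod.fst).Nodup
instance (seq_read : String) (ref_dict : List (String × Int)) (mismatches : List (String × String × Int × Int)) : Decidable (Pre_find_match seq_read ref_dict mismatches) := by unfold Pre_find_match; infer_instance
def pvWitness_find_match : String × (List (String × Int)) × (List (String × String × Int × Int)) :=
  ("AC", [("AA", 0)], [])

def Spec_find_match (seq_read : String) (ref_dict : List (String × Int)) (mismatches : List (String × String × Int × Int)) (out : Int) : Prop := out = find_match_alt seq_read ref_dict mismatches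
instance (seq_read : String) (ref_dict : List (String × Int)) (mismatches : List (String × String × Int × Int)) (out : Int) : Decidable (Spec_find_match seq_read ref_dict mismatches out) := by unfold Spec_find_match; infer_instance

-- ===== CLAIM (what is proved, stated in full; the proofs are below) =====
def Claim_equal_find_match : Prop := ∀ (seq_read : String) (ref_dict : List (String × Int)) (mismatches : List (String × String × Int × Int)), Dom_find_match seq_read ref_dict mismatches → Pre_find_match seq_read ref_dict mismatches → Spec_find_match seq_read ref_dict mismatches (find_match seq_read ref_dict mismatches)

-- ===== LEMMAS AND PROOFS =====

-- take j s = take j k ↔ j ≤ common prefix length (for j within both lengths)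
theorem pv_take_eq_iff (s : List Char) : ∀ (k : List Char) (j : Nat),
    j ≤ s.length → j ≤ k.length → (s.take j = k.take j ↔ j ≤ pvCpl s k) := by
  induction s with
  | nil =>
      intro k j hs _
      simp only [List.length_nil, Nat.le_zero] at hs
      subst hs
      simp
  | cons a as ih =>
      intro k j hs hk
      cases k with
      | nil =>
          simp only [List.length_nil, Nat.le_zero] at hk
          subst hk
          simp
      | cons b bs =>
          cases j with
          | zero => simp
          | succ j =>
              simp only [List.take_succ_cons, pvCpl]
              by_cases hab : a = b
              · subst hab
                rw [if_pos rfl]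
                simp only [List.cons.injEq, true_and]
                rw [ih bs j (by simpa using hs) (by simpa using hk)]
                omega
              · rw [if_neg hab]
                constructor
                · intro h; exact absurd (List.head_eq_of_cons_eq h) hab
                · omega

-- drop t s = drop t k ↔ (length - t) ≤ common suffix length, for equal-length lists
theorem pv_drop_eq_iff (s k : List Char) (t : Nat) (hlen : s.length = k.length)
    (_ht : t ≤ s.length) :
    (s.drop t = k.drop t ↔ s.length - t ≤ pvCpl s.reverse k.reverse) := by
  have h1 : (s.drop t).reverse = s.reverse.take (s.length - t) := List.reverse_drop ..
  have h2 : (k.drop t).reverse = k.reverse.take (k.length - t) := List.reverse_drop ..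
  constructor
  · intro h
    have := congrArg List.reverse h
    rw [h1, h2, ← hlen] at this
    exact (pv_take_eq_iff s.reverse k.reverse (s.length - t) (by simp)
      (by simp [← hlen])).1 this
  · intro h
    have := (pv_take_eq_iff s.reverse k.reverse (s.length - t) (by simp)
      (by simp [← hlen])).2 h
    rw [← h1, hlen, ← h2] at this
    exact List.reverse_injective this

-- a drop-equality below the end of k forces equal lengths
theorem pv_drop_eq_length (s k : List Char) (t : Nat) (ht : t < k.length)
    (h : s.drop t = k.drop t) : s.length = k.length := by
  have := congrArg List.length h
  simp only [List.length_drop] at this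
  omega

-- characterisation of A's condition for equal-length strings
theorem pv_condA_iff (s k : List Char) (i : Int) (hlen : s.length = k.length)
    (h0 : 0 ≤ i) (hi : i < (k.length : Int) - 1) :
    (pvCondA s k i = true ↔
      (s.length : Int) - 1 - (pvCpl s.reverse k.reverse : Int) ≤ i ∧ i ≤ (pvCpl s k : Int)) := by
  have hiN : i.toNat < k.length - 1 := by omega
  have hadd : (i + 1).toNat = i.toNat + 1 := by omega
  rw [pvCondA, Bool.and_eq_true, beq_iff_eq, beq_iff_eq,
    PySem.List.slice_to s (by omega), PySem.List.slice_to k (by omega),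
    PySem.List.slice_from s (by omega), PySem.List.slice_from k (by omega), hadd]
  rw [pv_take_eq_iff s k i.toNat (by omega) (by omega),
    pv_drop_eq_iff s k (i.toNat + 1) hlen (by omega)]
  omega

-- A's condition is false for every in-range index when the lengths differ
theorem pv_condA_false (s k : List Char) (i : Int) (hlen : s.length ≠ k.length)
    (h0 : 0 ≤ i) (hi : i < (k.length : Int) - 1) : pvCondA s k i = false := by
  rw [pvCondA]
  have hadd : (i + 1).toNat = i.toNat + 1 := by omega
  rw [PySem.List.slice_from s (by omega), PySem.List.slice_from k (by omega), hadd]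
  cases hd : (s.drop (i.toNat + 1) == k.drop (i.toNat + 1)) with
  | false => simp
  | true =>
      exact absurd (pv_drop_eq_length s k (i.toNat + 1) (by omega) (beq_iff_eq.1 hd)) hlen

theorem pvScanA_none (s k : List Char) (l : List Int)
    (h : ∀ i ∈ l, pvCondA s k i = false) : pvScanA s k l = none := by
  induction l with
  | nil => rfl
  | cons i rest ih =>
      simp only [pvScanA, h i (by simp), Bool.false_eq_true, if_false]
      exact ih (fun j hj => h j (by simp [hj]))

-- scanning range(a, b) for a condition true exactly on the interval [lo, hi]
theorem pvScanA_interval (s k : List Char) (b lo hi : Int) :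
    ∀ (fuel : Nat) (a : Int), (b - a).toNat ≤ fuel →
    (∀ i, a ≤ i → i < b → (pvCondA s k i = true ↔ lo ≤ i ∧ i ≤ hi)) →
    pvScanA s k (PySem.List.pyRange a b 1) =
      if max a lo ≤ hi ∧ max a lo < b then some (max a lo) else none := by
  intro fuel
  induction fuel with
  | zero =>
      intro a hf _
      have hba : b ≤ a := by omega
      rw [PySem.List.pyRange_one_eq_nil hba]
      rw [if_neg (by omega)]
      rfl
  | succ m ih =>
      intro a hf h
      by_cases hab : a < b
      · rw [PySem.List.pyRange_one_cons hab]
        simp only [pvScanA]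
        by_cases hc : pvCondA s k a = true
        · rw [if_pos hc]
          have ha : lo ≤ a ∧ a ≤ hi := (h a le_rfl hab).1 hc
          rw [if_pos (by omega)]
          congr 1
          omega
        · rw [if_neg hc]
          have hna : ¬ (lo ≤ a ∧ a ≤ hi) := fun hx => hc ((h a le_rfl hab).2 hx)
          rw [ih (a + 1) (by omega) (fun i h1 h2 => h i (by omega) h2)]
          by_cases hcase : a < lo
          · have : max (a + 1) lo = max a lo := by omega
            rw [this]
          · have h1 : ¬ (max (a + 1) lo ≤ hi ∧ max (a + 1) lo < b) := by omega
            have h2 : ¬ (max a lo ≤ hi ∧ max a lo < b) := by omega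
            rw [if_neg h1, if_neg h2]
      · rw [PySem.List.pyRange_one_eq_nil (by omega)]
        rw [if_neg (by omega)]
        rfl

-- per-key steps of the two ports agree
theorem pv_step_eq (s : List Char) (st : Int × PySem.Dict (String × String × Int) Int)
    (kv : String × Int) :
    pvStepA s st kv = pvStepB s s.reverse s.length st kv := by
  simp only [pvStepA, pvStepB]
  set k := kv.1.toList with hk
  by_cases hlen : k.length = s.length
  · -- equal lengths: the scan finds exactly B's derived index
    set p := pvCpl s k with hp
    set q := pvCpl s.reverse k.reverse with hq
    have hiff : ∀ i : Int, 0 ≤ i → i < (k.length : Int) - 1 →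
        (pvCondA s k i = true ↔ (s.length : Int) - 1 - (q : Int) ≤ i ∧ i ≤ (p : Int)) :=
      fun i h1 h2 => pv_condA_iff s k i hlen.symm h1 h2
    rw [pvScanA_interval s k ((k.length : Int) - 1) ((s.length : Int) - 1 - (q : Int)) (p : Int)
      ((k.length : Int) - 1 - 0).toNat 0 le_rfl (fun i h1 h2 => hiff i h1 h2)]
    rw [if_neg (by omega : ¬ k.length ≠ s.length)]
    have hmax : (if (s.length : Int) - 1 - (q : Int) < 0 then 0
        else (s.length : Int) - 1 - (q : Int)) = max 0 ((s.length : Int) - 1 - (q : Int)) := by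
      omega
    simp only [hmax]
    by_cases hcond : max 0 ((s.length : Int) - 1 - (q : Int)) ≤ (p : Int) ∧
        max 0 ((s.length : Int) - 1 - (q : Int)) < (k.length : Int) - 1
    · rw [if_pos hcond]
      rw [if_neg (by omega : ¬ (s.length : Int) - 2 < max 0 ((s.length : Int) - 1 - (q : Int)))]
      rw [if_neg (by omega : ¬ (p : Int) < max 0 ((s.length : Int) - 1 - (q : Int)))]
      cases h : st.2.get? (pvMisKey s k kv.2 (max 0 ((s.length : Int) - 1 - (q : Int)))) with
      | none => simp [PySem.Dict.getD_eq_get?_getD, h]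
      | some c => simp [PySem.Dict.getD_eq_get?_getD, h]
    · rw [if_neg hcond]
      by_cases h1 : (s.length : Int) - 2 < max 0 ((s.length : Int) - 1 - (q : Int))
      · rw [if_pos h1]
      · rw [if_neg h1, if_pos (by omega : (p : Int) < max 0 ((s.length : Int) - 1 - (q : Int)))]
  · -- different lengths: A's condition never holds, B skips the key
    rw [pvScanA_none s k _ (fun i hi => by
      rw [PySem.List.mem_pyRange_one] at hi
      exact pv_condA_false s k i (fun h => hlen h.symm) hi.1 hi.2)]
    rw [if_pos (by omega : k.length ≠ s.length)]

-- ===== VERDICT (by name: the statement is the Claim_ definition above) =====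
theorem find_match_spec : Claim_equal_find_match := by
  intro seq_read ref_dict mismatches _ _
  unfold Spec_find_match find_match find_match_alt
  have hf : pvStepA seq_read.toList
      = pvStepB seq_read.toList seq_read.toList.reverse seq_read.toList.length :=
    funext fun st => funext fun kv => pv_step_eq seq_read.toList st kv
  rw [hf]
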